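-- pv_equiv track=rewrite | github.com/ayhanozemre/slack-exporter | html_generator.py | content_replacement
-- ===== SOURCE A (Python) =====
-- def content_replacement(content, members):
--     for member_id, member_info in members.items():
--         mention_tag = '<@%s>' % member_id
--         name = get_member_name(member_info)
--         name_html = '<span style="color:red">' + name + '</span>'
--         content = content.replace(mention_tag, name_html)
--     # html blocker tags
--     content = content.replace('<https', 'https')
--     content = content.replace('png>', 'png ')
--     return content
--
-- def get_member_name(member_info, default_member_name='unknown-name'):
--     if member_info is None:
--         return default_member_name
--     return member_info.get('display_name') or \
--         member_info.get('email') or \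
--         member_info.get('real_name') or default_member_name
-- ===== SOURCE B (Python) =====
-- def get_member_name(member_info, default_member_name='unknown-name'):
--     if member_info is None:
--         return default_member_name
--     return member_info.get('display_name') or \
--         member_info.get('email') or \
--         member_info.get('real_name') or default_member_name
--
--
-- def content_replacement(content, members):
--     repl = {m_id: '<span style="color:red">' + get_member_name(info) + '</span>'
--             for m_id, info in members.items()}
--     out = []
--     i, n = 0, len(content)
--     while i < n:
--         if content.startswith('<@', i):
--             j = content.find('>', i + 2)
--             if j != -1 and content[i + 2:j] in repl:
--                 out.append(repl[content[i + 2:j]])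
--                 i = j + 1
--                 continue
--         out.append(content[i])
--         i += 1
--     s = ''.join(out)
--     s = s.replace('<https', 'https')
--     return s.replace('png>', 'png ')
-- ===== Notes on version B (the rewrite author's own statement) =====
-- stated objective: faster
-- what changed: One left-to-right scan of the content that reads each '<@...>' tag once and substitutes via a prebuilt id->html dict, instead of one full-string replace pass per member.
import Mathlib
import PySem

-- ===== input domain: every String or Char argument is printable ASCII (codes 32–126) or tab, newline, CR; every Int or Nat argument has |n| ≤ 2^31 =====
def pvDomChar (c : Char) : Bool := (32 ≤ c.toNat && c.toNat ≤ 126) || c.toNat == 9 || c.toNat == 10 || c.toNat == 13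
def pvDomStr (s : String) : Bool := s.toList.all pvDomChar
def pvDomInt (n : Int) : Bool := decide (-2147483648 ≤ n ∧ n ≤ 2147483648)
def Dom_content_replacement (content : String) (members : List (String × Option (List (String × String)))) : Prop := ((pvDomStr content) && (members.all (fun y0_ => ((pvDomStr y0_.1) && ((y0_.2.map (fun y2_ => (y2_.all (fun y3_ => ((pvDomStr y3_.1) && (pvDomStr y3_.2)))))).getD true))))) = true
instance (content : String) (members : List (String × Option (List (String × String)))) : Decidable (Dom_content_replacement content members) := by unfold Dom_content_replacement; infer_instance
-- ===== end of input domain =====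

-- B replaces A's one full-string `.replace` pass per member by a single left-to-right scan of the
-- content with a prebuilt id→html dictionary (objective: faster; measured).

-- ===== PORT A =====
-- shared helper: Python's `x or y` on Optional[str] (None and '' are falsy)
def pvOrStr (x : Option String) (y : String) : String :=
  match x with
  | some s => if s = "" then y else s
  | none => y

-- port of get_member_name (member_info.get chained with `or`)
def pvGetName (info : Option (List (String × String))) : String :=
  match info with
  | none => "unknown-name"
  | some l =>
    let d := PySem.Dict.ofList l
    pvOrStr (d.get? "display_name") (pvOrStr (d.get? "email") (pvOrStr (d.get? "real_name") "unknown-name"))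

-- '<@%s>' % member_id, as chars
def pvTag (k : String) : List Char := '<' :: '@' :: (k.toList ++ ['>'])

-- '<span style="color:red">' + name + '</span>', as chars
def pvHtml (name : String) : List Char :=
  "<span style=\"color:red\">".toList ++ name.toList ++ "</span>".toList

-- port of A: one str.replace pass per member of the dict, then the two fixed replaces
-- (strings are handled on their char lists via PySem.Chars, exact per PYSEM.md)
def content_replacement (content : String) (members : List (String × Option (List (String × String)))) : String :=
  let c1 := (PySem.Dict.ofList members).items.foldl
    (fun c kv => PySem.Chars.replace c (pvTag kv.1) (pvHtml (pvGetName kv.2))) content.toList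
  let c2 := PySem.Chars.replace c1 "<https".toList "https".toList
  let c3 := PySem.Chars.replace c2 "png>".toList "png ".toList
  String.ofList c3

-- ===== PORT B =====
-- B's id→html dict ({m_id: html for m_id, info in members.items()})
def pvRepls (ms : List (String × Option (List (String × String)))) : PySem.Dict (List Char) (List Char) :=
  ms.foldl (fun r kv => r.insert kv.1.toList (pvHtml (pvGetName kv.2))) PySem.Dict.empty

-- B's single scan: at '<@' read the id up to the next '>' (str.partition) and look it up
def pvScan (repl : PySem.Dict (List Char) (List Char)) : List Char → List Char
  | [] => []
  | c :: t =>
    if c = '<' ∧ t.head? = some '@' then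
      match h : t.tail.span (fun ch => ch ≠ '>') with
      | (id0, '>' :: after) =>
        match repl.get? id0 with
        | some html => html ++ pvScan repl after
        | none => c :: pvScan repl t
      | _ => c :: pvScan repl t
    else c :: pvScan repl t
termination_by s => s.length
decreasing_by
  · rw [List.span_eq_takeWhile_dropWhile, Prod.mk.injEq] at h
    have h2 : ('>' :: after).length ≤ t.tail.length := h.2 ▸ List.length_dropWhile_le _ _
    have h3 : t.tail.length ≤ t.length := by cases t <;> simp
    simp only [List.length_cons] at h2 ⊢
    omega
  all_goals (simp only [List.length_cons]; omega)

def content_replacement_alt (content : String) (members : List (String × Option (List (String × String)))) : String :=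
  let repl := pvRepls (PySem.Dict.ofList members).items
  let s1 := pvScan repl content.toList
  let s2 := PySem.Chars.replace s1 "<https".toList "https".toList
  let s3 := PySem.Chars.replace s2 "png>".toList "png ".toList
  String.ofList s3

-- ===== PRECONDITION & SPEC =====
-- Pre_ excludes only inputs whose content contains a '<@' mention opener while some member id
-- contains '<' or '>' or some member's resolved name contains '<': there A's sequential
-- per-member replacement can cascade into previously inserted names (or match tags with an
-- embedded '>'), an accidental order-dependent corner behaviour that a single scan has no
-- reason to reproduce.
def Pre_content_replacement (content : String) (members : List (String × Option (List (String × String)))) : Prop :=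
  (PySem.Str.isIn "<@" content = false) ∨
  ∀ p ∈ members, (p.1.toList.all (fun c => !(c = '<' || c = '>')) = true) ∧
    ((pvGetName p.2).toList.all (fun c => !(c = '<')) = true)
instance (content : String) (members : List (String × Option (List (String × String)))) : Decidable (Pre_content_replacement content members) := by unfold Pre_content_replacement; infer_instance

def pvWitness_content_replacement : String × (List (String × Option (List (String × String)))) :=
  ("hi <@u1>!", [("u1", some [("display_name", "Ann")]), ("u2", none)])

def Spec_content_replacement (content : String) (members : List (String × Option (List (String × String)))) (out : String) : Prop := out = content_replacement_alt content members
instance (content : String) (members : List (String × Option (List (String × String)))) (out : String) : Decidable (Spec_content_replacement content members out) := by unfold Spec_content_replacement; infer_instance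

-- ===== CLAIM (what is proved, stated in full; the proofs are below) =====
def Claim_equal_content_replacement : Prop := ∀ (content : String) (members : List (String × Option (List (String × String)))), Dom_content_replacement content members → Pre_content_replacement content members → Spec_content_replacement content members (content_replacement content members)

-- ===== LEMMAS AND PROOFS =====

-- structural restatement of str.replace (old ≠ [])
def pvRepl (old new : List Char) : List Char → List Char
  | [] => []
  | c :: t =>
    if old.isPrefixOf (c :: t) ∧ old ≠ [] then new ++ pvRepl old new (List.drop old.length (c :: t))
    else c :: pvRepl old new t
termination_by s => s.length
decreasing_by
  · rename_i h; rcases h with ⟨-, hne⟩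
    cases old with
    | nil => exact absurd rfl hne
    | cons o os => simp only [List.length_drop, List.length_cons]; omega
  · simp only [List.length_cons]; omega

theorem pvRepl_nil (old new : List Char) : pvRepl old new [] = [] := by simp [pvRepl]

-- a key that contains neither '<' nor '>'
def pvKeyOk (l : List Char) : Prop := ∀ c ∈ l, c ≠ '<' ∧ c ≠ '>' 

theorem pvRepl_cons_of_not_prefix {old : List Char} (new : List Char) {c : Char} {t : List Char}
    (h : ¬ old <+: (c :: t)) : pvRepl old new (c :: t) = c :: pvRepl old new t := by
  rw [pvRepl]
  simp [List.isPrefixOf_iff_prefix, h]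

theorem pvRepl_of_prefix {old : List Char} (new : List Char) {c : Char} {t : List Char}
    (h : old <+: (c :: t)) (hne : old ≠ []) :
    pvRepl old new (c :: t) = new ++ pvRepl old new (List.drop old.length (c :: t)) := by
  rw [pvRepl]
  simp [List.isPrefixOf_iff_prefix, h, hne]

theorem pvRepl_append_no_match (old new : List Char) :
    ∀ (p u : List Char), (∀ i < p.length, ¬ old <+: (p ++ u).drop i) →
    pvRepl old new (p ++ u) = p ++ pvRepl old new u := by
  intro p
  induction p with
  | nil => intro u _; rfl
  | cons c p' ih =>
    intro u hyp
    have h0 : ¬ old <+: (c :: (p' ++ u)) := by simpa using hyp 0 (by simp)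
    rw [List.cons_append, pvRepl_cons_of_not_prefix _ h0,
        ih u (fun i hi => by simpa using hyp (i + 1) (by simp; omega))]
    simp

theorem pvRepl_no_gt {old : List Char} (new : List Char) (hgt : '>' ∈ old) :
    ∀ {u : List Char}, (∀ c ∈ u, c ≠ '>') → pvRepl old new u = u := by
  intro u
  induction u with
  | nil => intro _; exact pvRepl_nil _ _
  | cons c t ih =>
    intro hu
    have hnp : ¬ old <+: (c :: t) := fun hp => hu '>' (hp.subset hgt) rfl
    rw [pvRepl_cons_of_not_prefix _ hnp, ih (fun c hc => hu c (List.mem_cons_of_mem _ hc))]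

theorem pvRepl_prefix_reflect {old new : List Char} (hnew : new.head? = some '<') :
    ∀ (u q : List Char), (∀ c ∈ q, c ≠ '<' ∧ c ≠ '>') →
    (q ++ ['>']) <+: pvRepl old new u → (q ++ ['>']) <+: u := by
  intro u
  induction u with
  | nil =>
    intro q _ hp
    rw [pvRepl_nil] at hp
    simp at hp
  | cons c t ih =>
    intro q hq hp
    by_cases hpre : old.isPrefixOf (c :: t) ∧ old ≠ []
    · rw [pvRepl] at hp
      rw [if_pos hpre] at hp
      exfalso
      obtain ⟨nh, nt, hnew'⟩ : ∃ nh nt, new = nh :: nt := by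
        cases new with
        | nil => simp at hnew
        | cons a b => exact ⟨a, b, rfl⟩
      have hnh : nh = '<' := by rw [hnew'] at hnew; simpa using hnew
      cases q with
      | nil =>
        simp only [List.nil_append] at hp
        rcases hp with ⟨w, hw⟩
        have := congrArg List.head? hw
        rw [hnew', hnh] at this
        simp at this
      | cons q0 q' =>
        have hh : (q0 :: (q' ++ ['>'])).head? = (new ++ pvRepl old new (List.drop old.length (c :: t))).head? := by
          rcases hp with ⟨w, hw⟩
          rw [← hw]
          simp
        rw [hnew', hnh] at hh
        simp at hh
        exact (hq q0 (by simp)).1 hh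
    · rw [pvRepl, if_neg hpre] at hp
      cases q with
      | nil =>
        simp only [List.nil_append] at hp ⊢
        rcases hp with ⟨w, hw⟩
        have : c = '>' := by
          have := congrArg List.head? hw
          simpa using this.symm
        exact this ▸ (List.cons_prefix_cons.mpr ⟨rfl, List.nil_prefix⟩)
      | cons q0 q' =>
        rw [List.cons_append] at hp ⊢
        rw [List.cons_prefix_cons] at hp ⊢
        exact ⟨hp.1, ih q' (fun c hc => hq c (by simp [hc])) hp.2⟩

-- bridge: PySem.Chars.replace = pvRepl for nonempty old
theorem pvGo_eq (old new : List Char) (hne : old ≠ []) :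
    ∀ (fuel : Nat) (l acc : List Char), l.length ≤ fuel →
    PySem.Chars.replace.go old new fuel l acc = acc.reverse ++ pvRepl old new l := by
  intro fuel
  induction fuel with
  | zero =>
    intro l acc hl
    have : l = [] := by cases l <;> simp_all
    subst this
    simp [PySem.Chars.replace.go, pvRepl_nil]
  | succ n ih =>
    intro l acc hl
    cases l with
    | nil => simp [PySem.Chars.replace.go, pvRepl_nil]
    | cons c t =>
      rw [PySem.Chars.replace.go]
      by_cases hp : old.isPrefixOf (c :: t)
      · rw [if_pos hp]
        obtain ⟨o, os, rfl⟩ : ∃ o os, old = o :: os := by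
          cases old with
          | nil => exact absurd rfl hne
          | cons o os => exact ⟨o, os, rfl⟩
        have hlen : (List.drop (o :: os).length (c :: t)).length ≤ n := by
          simp only [List.length_drop, List.length_cons] at *
          omega
        rw [ih _ _ hlen, pvRepl_of_prefix new (List.isPrefixOf_iff_prefix.mp hp) hne]
        simp
      · rw [if_neg hp]
        have hlen : t.length ≤ n := by simp at hl; omega
        rw [ih _ _ hlen, pvRepl_cons_of_not_prefix new (fun hx => hp (List.isPrefixOf_iff_prefix.mpr hx))]
        simp

theorem pvReplace_eq_pvRepl (old new : List Char) (hne : old ≠ []) (s : List Char) :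
    PySem.Chars.replace s old new = pvRepl old new s := by
  rw [PySem.Chars.replace]
  rw [if_neg (by simpa using hne)]
  simpa using pvGo_eq old new hne s.length s [] le_rfl

-- pvScan unfolding lemmas
theorem pvScan_nil (r : PySem.Dict (List Char) (List Char)) : pvScan r [] = [] := by simp [pvScan]

theorem pvScan_cons_not (r : PySem.Dict (List Char) (List Char)) {c : Char} {t : List Char}
    (h : ¬ (c = '<' ∧ t.head? = some '@')) : pvScan r (c :: t) = c :: pvScan r t := by
  rw [pvScan]; simp [h]

theorem pvScan_hit (r : PySem.Dict (List Char) (List Char)) {u id0 after html : List Char}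
    (h : u.span (fun ch => ch ≠ '>') = (id0, '>' :: after)) (hg : r.get? id0 = some html) :
    pvScan r ('<' :: '@' :: u) = html ++ pvScan r after := by
  rw [pvScan, if_pos ⟨rfl, rfl⟩]
  simp only [List.tail_cons]
  split
  · rename_i id1 after1 heq
    rw [h] at heq
    obtain ⟨h1, h2⟩ := Prod.mk.injEq .. ▸ heq
    obtain ⟨rfl, rfl⟩ : id0 = id1 ∧ after = after1 := ⟨h1, (List.cons.injEq .. ▸ h2).2⟩
    simp only [hg]
  · rename_i hno
    exact (hno _ _ h).elim

theorem pvScan_miss (r : PySem.Dict (List Char) (List Char)) {u id0 after : List Char}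
    (h : u.span (fun ch => ch ≠ '>') = (id0, '>' :: after)) (hg : r.get? id0 = none) :
    pvScan r ('<' :: '@' :: u) = '<' :: pvScan r ('@' :: u) := by
  rw [pvScan, if_pos ⟨rfl, rfl⟩]
  simp only [List.tail_cons]
  split
  · rename_i id1 after1 heq
    rw [h] at heq
    obtain ⟨h1, h2⟩ := Prod.mk.injEq .. ▸ heq
    obtain ⟨rfl, rfl⟩ : id0 = id1 ∧ after = after1 := ⟨h1, (List.cons.injEq .. ▸ h2).2⟩
    simp only [hg]
  · rename_i hno
    exact (hno _ _ h).elim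

theorem pvScan_nogt (r : PySem.Dict (List Char) (List Char)) {u id0 : List Char}
    (h : u.span (fun ch => ch ≠ '>') = (id0, [])) :
    pvScan r ('<' :: '@' :: u) = '<' :: pvScan r ('@' :: u) := by
  rw [pvScan, if_pos ⟨rfl, rfl⟩]
  simp only [List.tail_cons]
  split
  · rename_i id1 after1 heq
    rw [h] at heq
    exact absurd (Prod.mk.injEq .. ▸ heq).2 (by simp)
  · rfl

theorem pvScan_copy (r : PySem.Dict (List Char) (List Char)) :
    ∀ (p z : List Char), (∀ c ∈ p, c ≠ '<') → pvScan r (p ++ z) = p ++ pvScan r z := by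
  intro p
  induction p with
  | nil => intro z _; rfl
  | cons c p' ih =>
    intro z hp
    rw [List.cons_append, pvScan_cons_not r (by rintro ⟨rfl, -⟩; exact hp '<' (by simp) rfl),
        ih z (fun c hc => hp c (by simp [hc]))]
    simp

theorem pvHtml_eq (name : String) :
    pvHtml name = '<' :: ("span style=\"color:red\">".toList ++ (name.toList ++ ('<' :: "/span>".toList))) := by
  show "<span style=\"color:red\">".toList ++ name.toList ++ "</span>".toList = _
  have h1 : "<span style=\"color:red\">".toList = '<' :: "span style=\"color:red\">".toList := rfl
  have h2 : "</span>".toList = '<' :: "/span>".toList := rfl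
  rw [h1, h2]
  simp

theorem pvHtml_head (name : String) : (pvHtml name).head? = some '<' := by
  rw [pvHtml_eq]; rfl

theorem pvAllNe_of_all {p : List Char} {f : Char → Bool} (hf : ∀ c, f c = true → c ≠ '<')
    (h : p.all f = true) : ∀ c ∈ p, c ≠ '<' :=
  fun c hc => hf c (List.all_eq_true.mp h c hc)

theorem pvNoLt_lit1 : ∀ c ∈ "span style=\"color:red\">".toList, c ≠ '<' :=
  pvAllNe_of_all (f := fun c => !(c = '<')) (fun c h => by simpa using h) (by rfl)

theorem pvNoLt_lit2 : ∀ c ∈ "/span>".toList, c ≠ '<' :=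
  pvAllNe_of_all (f := fun c => !(c = '<')) (fun c h => by simpa using h) (by rfl)

theorem pvScan_html (r : PySem.Dict (List Char) (List Char)) (name : String)
    (hn : ∀ c ∈ name.toList, c ≠ '<') (z : List Char) :
    pvScan r (pvHtml name ++ z) = pvHtml name ++ pvScan r z := by
  rw [pvHtml_eq]
  rw [List.cons_append, pvScan_cons_not r (by rintro ⟨-, hh⟩; simp at hh)]
  rw [List.append_assoc, List.append_assoc]
  rw [pvScan_copy r _ _ pvNoLt_lit1]
  rw [pvScan_copy r _ _ hn]
  rw [List.cons_append, pvScan_cons_not r (by rintro ⟨-, hh⟩; simp at hh)]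
  rw [pvScan_copy r _ _ pvNoLt_lit2]
  simp

theorem pvSpan_cases (u : List Char) :
    (u.span (fun ch => ch ≠ '>') = (u, []) ∧ ∀ c ∈ u, c ≠ '>') ∨
    ∃ a b, u.span (fun ch => ch ≠ '>') = (a, '>' :: b) := by
  induction u with
  | nil => left; exact ⟨rfl, by simp⟩
  | cons c t ih =>
    by_cases hc : c = '>'
    · right
      refine ⟨[], t, ?_⟩
      subst hc
      simp [List.span_eq_takeWhile_dropWhile, List.takeWhile_cons, List.dropWhile_cons]
    · rcases ih with ⟨h1, h2⟩ | ⟨a, b, hab⟩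
      · left
        refine ⟨?_, ?_⟩
        · rw [List.span_eq_takeWhile_dropWhile, Prod.mk.injEq] at h1 ⊢
          simp only [ne_eq, decide_not] at h1 ⊢
          simp only [List.takeWhile_cons, List.dropWhile_cons]
          simp [hc, h1.1, h1.2]
        · intro x hx
          rcases List.mem_cons.mp hx with rfl | hx
          · exact hc
          · exact h2 x hx
      · right
        refine ⟨c :: a, b, ?_⟩
        rw [List.span_eq_takeWhile_dropWhile, Prod.mk.injEq] at hab ⊢
        simp only [ne_eq, decide_not] at hab ⊢
        simp only [List.takeWhile_cons, List.dropWhile_cons]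
        simp [hc, hab.1, hab.2]

theorem pvSpan_spec {u a b : List Char} (h : u.span (fun ch => ch ≠ '>') = (a, b)) :
    u = a ++ b ∧ ∀ c ∈ a, c ≠ '>' := by
  rw [List.span_eq_takeWhile_dropWhile, Prod.mk.injEq] at h
  constructor
  · rw [← h.1, ← h.2, List.takeWhile_append_dropWhile]
  · intro c hc
    rw [← h.1] at hc
    simpa using List.mem_takeWhile_imp hc

theorem pvScan_empty : ∀ (s : List Char), pvScan PySem.Dict.empty s = s := by
  have key : ∀ (n : Nat) (s : List Char), s.length ≤ n → pvScan PySem.Dict.empty s = s := by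
    intro n
    induction n with
    | zero =>
      intro s h
      have : s = [] := by cases s <;> simp_all
      subst this; exact pvScan_nil _
    | succ n ih =>
      intro s h
      match s with
      | [] => exact pvScan_nil _
      | c :: t =>
        by_cases hc : c = '<' ∧ t.head? = some '@'
        · obtain ⟨rfl, hh⟩ := hc
          obtain ⟨u, rfl⟩ : ∃ u, t = '@' :: u := by
            cases t with
            | nil => simp at hh
            | cons a b =>
              have : a = '@' := by simpa using hh
              exact ⟨b, by rw [this]⟩
          have hrec : pvScan PySem.Dict.empty ('@' :: u) = '@' :: u := by
            apply ih; simp at h ⊢; omega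
          rcases pvSpan_cases u with ⟨h1, -⟩ | ⟨a, b, hab⟩
          · rw [pvScan_nogt _ h1, hrec]
          · rw [pvScan_miss _ hab (PySem.Dict.get?_empty _), hrec]
        · rw [pvScan_cons_not _ hc, ih t (by simp at h; omega)]
  exact fun s => key s.length s le_rfl

-- span helpers
theorem pvSpan_append_gt {a : List Char} (b : List Char) (ha : ∀ c ∈ a, c ≠ '>') :
    (a ++ '>' :: b).span (fun ch => ch ≠ '>') = (a, '>' :: b) := by
  induction a with
  | nil => simp [List.span_eq_takeWhile_dropWhile, List.dropWhile_cons]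
  | cons c a' ih =>
    have hc : c ≠ '>' := ha c (by simp)
    have ih' := ih (fun c hc => ha c (by simp [hc]))
    rw [List.span_eq_takeWhile_dropWhile, Prod.mk.injEq] at ih'
    rw [List.span_eq_takeWhile_dropWhile, Prod.mk.injEq]
    simp only [ne_eq, decide_not] at ih' ⊢
    simp only [List.cons_append, List.takeWhile_cons, List.dropWhile_cons]
    simp [hc, ih'.1, ih'.2]

theorem pvGtFree_unique {a : List Char} : ∀ {a' b b' : List Char}, (∀ c ∈ a, c ≠ '>') → (∀ c ∈ a', c ≠ '>') →
    a ++ '>' :: b = a' ++ '>' :: b' → a = a' ∧ b = b' := by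
  induction a with
  | nil =>
    intro a' b b' _ ha' h
    cases a' with
    | nil => simpa using h
    | cons c t =>
      exfalso
      have : '>' = c := by simpa using congrArg List.head? h
      exact ha' c (by simp) this.symm
  | cons c a0 ih =>
    intro a' b b' ha ha' h
    cases a' with
    | nil =>
      exfalso
      have : c = '>' := by simpa using congrArg List.head? h
      exact ha c (by simp) this
    | cons c' t =>
      simp only [List.cons_append, List.cons.injEq] at h
      obtain ⟨rfl, h2⟩ := h
      obtain ⟨h3, h4⟩ := ih (fun x hx => ha x (by simp [hx])) (fun x hx => ha' x (by simp [hx])) h2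
      exact ⟨by rw [h3], h4⟩

-- dict helpers for the fold of inserts
theorem pvGet_foldl_insert_not_mem {α : Type} (f : α → List Char) (g : α → List Char) :
    ∀ (l : List α) (d : PySem.Dict (List Char) (List Char)) (x : List Char),
    (∀ kv ∈ l, f kv ≠ x) → (l.foldl (fun r kv => r.insert (f kv) (g kv)) d).get? x = d.get? x := by
  intro l
  induction l with
  | nil => intro d x _; rfl
  | cons kv l' ih =>
    intro d x hne
    rw [List.foldl_cons, ih _ x (fun a ha => hne a (by simp [ha])),
        PySem.Dict.get?_insert_of_ne _ _ (fun hx => hne kv (by simp) hx.symm)]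

theorem pvGet_foldl_insert_congr {α : Type} (f : α → List Char) (g : α → List Char) :
    ∀ (l : List α) (d1 d2 : PySem.Dict (List Char) (List Char)) (x : List Char),
    d1.get? x = d2.get? x →
    (l.foldl (fun r kv => r.insert (f kv) (g kv)) d1).get? x =
    (l.foldl (fun r kv => r.insert (f kv) (g kv)) d2).get? x := by
  intro l
  induction l with
  | nil => intro d1 d2 x h; exact h
  | cons kv l' ih =>
    intro d1 d2 x h
    rw [List.foldl_cons, List.foldl_cons]
    apply ih
    rw [PySem.Dict.get?_insert, PySem.Dict.get?_insert]
    split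
    · rfl
    · exact h

theorem pvGet_foldl_insert_prop {α : Type} (f : α → List Char) (g : α → List Char) (P : List Char → Prop) :
    ∀ (l : List α) (d : PySem.Dict (List Char) (List Char)),
    (∀ kv ∈ l, P (f kv)) → (∀ x h, d.get? x = some h → P x) →
    ∀ x h, (l.foldl (fun r kv => r.insert (f kv) (g kv)) d).get? x = some h → P x := by
  intro l
  induction l with
  | nil => intro d _ hd x h hx; exact hd x h hx
  | cons kv l' ih =>
    intro d hl hd x h hx
    rw [List.foldl_cons] at hx
    refine ih _ (fun a ha => hl a (by simp [ha])) ?_ x h hx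
    intro y hy hgy
    rw [PySem.Dict.get?_insert] at hgy
    split at hgy
    · subst y; exact hl kv (by simp)
    · exact hd y hy hgy

theorem pvPrefix_head {l m : List Char} {a : Char} (h : (a :: l) <+: m) : m.head? = some a := by
  rcases h with ⟨w, hw⟩
  rw [← hw]
  rfl

theorem pvRepl_head_amp {old new : List Char} (hold : old.head? = some '<')
    (hnew : new.head? = some '<') (t : List Char)
    (h : (pvRepl old new t).head? = some '@') : t.head? = some '@' := by
  cases t with
  | nil => rw [pvRepl_nil] at h; simp at h
  | cons c t' =>
    rw [pvRepl] at h
    split at h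
    · obtain ⟨nh, nt, rfl⟩ : ∃ nh nt, new = nh :: nt := by
        cases new with
        | nil => simp at hnew
        | cons a b => exact ⟨a, b, rfl⟩
      have : nh = '<' := by simpa using hnew
      subst this
      simp at h
    · simpa using h

theorem pvNoPrefixAt {old : List Char} (hold : old.head? = some '<') {p : List Char}
    (hp : ∀ c ∈ p, c ≠ '<') (u : List Char) :
    ∀ i < p.length, ¬ old <+: (p ++ u).drop i := by
  intro i hi hpre
  obtain ⟨os, rfl⟩ : ∃ os, old = '<' :: os := by
    cases old with
    | nil => simp at hold
    | cons a b =>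
      have ha : a = '<' := by simpa using hold
      subst ha
      exact ⟨b, rfl⟩
  have h1 : ((p ++ u).drop i).head? = some '<' := pvPrefix_head hpre
  rw [List.head?_drop, List.getElem?_append_left hi, List.getElem?_eq_getElem hi] at h1
  exact hp p[i] (List.getElem_mem hi) (by simpa using h1)

-- the one-member key lemma: scanning after one textual replace = scanning with the key added
theorem pvKey (km hmName : List Char) (name : String) (repl' repl : PySem.Dict (List Char) (List Char))
    (hkm : pvKeyOk km)
    (hhm : hmName = pvHtml name) (hname : ∀ c ∈ name.toList, c ≠ '<')
    (hmiss : repl'.get? km = none)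
    (hkeys : ∀ x h, repl'.get? x = some h → pvKeyOk x)
    (hrepl : ∀ x, repl.get? x = if x = km then some hmName else repl'.get? x) :
    ∀ (s : List Char), pvScan repl' (pvRepl ('<' :: '@' :: (km ++ ['>'])) hmName s) = pvScan repl s := by
  subst hhm
  have hmhead : (pvHtml name).head? = some '<' := pvHtml_head name
  have key : ∀ (n : Nat) (s : List Char), s.length ≤ n →
      pvScan repl' (pvRepl ('<' :: '@' :: (km ++ ['>'])) (pvHtml name) s) = pvScan repl s := by
    intro n
    induction n with
    | zero =>
      intro s hlen
      have : s = [] := by cases s <;> simp_all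
      subst this
      rw [pvRepl_nil, pvScan_nil, pvScan_nil]
    | succ n ih =>
      intro s hlen
      by_cases htag : ('<' :: '@' :: (km ++ ['>'])) <+: s
      · rcases htag with ⟨rest, hrest⟩
        subst hrest
        have hL1 : pvRepl ('<' :: '@' :: (km ++ ['>'])) (pvHtml name) (('<' :: '@' :: (km ++ ['>'])) ++ rest)
            = pvHtml name ++ pvRepl ('<' :: '@' :: (km ++ ['>'])) (pvHtml name) rest := by
          have e1 : ('<' :: '@' :: (km ++ ['>'])) ++ rest = '<' :: (('@' :: (km ++ ['>'])) ++ rest) := by simp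
          rw [e1, pvRepl_of_prefix _ (by rw [← e1]; exact List.prefix_append _ _) (by simp)]
          rw [← e1, List.drop_left]
        rw [hL1, pvScan_html repl' name hname]
        have e2 : ('<' :: '@' :: (km ++ ['>'])) ++ rest = '<' :: '@' :: (km ++ '>' :: rest) := by simp
        rw [e2, pvScan_hit repl (pvSpan_append_gt rest (fun c hc => (hkm c hc).2))
              (by rw [hrepl km, if_pos rfl])]
        have hr : rest.length ≤ n := by simp at hlen; omega
        rw [ih rest hr]
      · cases s with
        | nil => rw [pvRepl_nil, pvScan_nil, pvScan_nil]
        | cons c t =>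
          by_cases hc : c = '<' ∧ t.head? = some '@'
          · obtain ⟨rfl, hh⟩ := hc
            obtain ⟨u, rfl⟩ : ∃ u, t = '@' :: u := by
              cases t with
              | nil => simp at hh
              | cons a b =>
                have : a = '@' := by simpa using hh
                exact ⟨b, by rw [this]⟩
            have hnp2 : ¬ ('<' :: '@' :: (km ++ ['>'])) <+: ('@' :: u) := by
              intro hx
              have := pvPrefix_head hx
              simp at this
            have hL : pvRepl ('<' :: '@' :: (km ++ ['>'])) (pvHtml name) ('<' :: '@' :: u)
                = '<' :: '@' :: pvRepl ('<' :: '@' :: (km ++ ['>'])) (pvHtml name) u := by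
              rw [pvRepl_cons_of_not_prefix _ htag, pvRepl_cons_of_not_prefix _ hnp2]
            have hihAt : pvScan repl' ('@' :: pvRepl ('<' :: '@' :: (km ++ ['>'])) (pvHtml name) u)
                = pvScan repl ('@' :: u) := by
              have hx := ih ('@' :: u) (by simp at hlen ⊢; omega)
              rw [pvRepl_cons_of_not_prefix _ hnp2] at hx
              exact hx
            rw [hL]
            rcases pvSpan_cases u with ⟨hsp, hnog⟩ | ⟨id0, after, hsp⟩
            · have hru : pvRepl ('<' :: '@' :: (km ++ ['>'])) (pvHtml name) u = u :=
                pvRepl_no_gt _ (by simp) hnog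
              rw [hru]
              rw [pvScan_nogt repl' hsp, pvScan_nogt repl hsp]
              rw [hru] at hihAt
              rw [hihAt]
            · obtain ⟨hu, hid0⟩ := pvSpan_spec hsp
              cases hrg : repl.get? id0 with
              | some h0 =>
                have hne0 : id0 ≠ km := by
                  rintro rfl
                  exact htag ⟨after, by simp [hu]⟩
                have hg' : repl'.get? id0 = some h0 := by
                  have h5 := hrepl id0
                  rw [if_neg hne0] at h5
                  rw [← h5, hrg]
                have hok0 := hkeys _ _ hg'
                have hLu : pvRepl ('<' :: '@' :: (km ++ ['>'])) (pvHtml name) u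
                    = id0 ++ '>' :: pvRepl ('<' :: '@' :: (km ++ ['>'])) (pvHtml name) after := by
                  rw [hu, show id0 ++ '>' :: after = (id0 ++ ['>']) ++ after from by simp]
                  rw [pvRepl_append_no_match _ _ _ _ (pvNoPrefixAt rfl
                    (fun c hc => by
                      rcases List.mem_append.mp hc with h1 | h1
                      · exact (hok0 c h1).1
                      · simp at h1; subst h1; simp) after)]
                  simp
                rw [hLu]
                rw [pvScan_hit repl' (pvSpan_append_gt _ (fun c hc => (hok0 c hc).2)) hg']
                rw [pvScan_hit repl hsp hrg]
                have ha : after.length ≤ n := by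
                  rw [hu] at hlen
                  simp at hlen ⊢
                  omega
                rw [ih after ha]
              | none =>
                rw [pvScan_miss repl hsp hrg]
                rcases pvSpan_cases (pvRepl ('<' :: '@' :: (km ++ ['>'])) (pvHtml name) u) with ⟨hsp', -⟩ | ⟨id0', after', hsp'⟩
                · rw [pvScan_nogt repl' hsp', hihAt]
                · obtain ⟨hu', hid0'⟩ := pvSpan_spec hsp'
                  have hg'' : repl'.get? id0' = none := by
                    cases hgg : repl'.get? id0' with
                    | none => rfl
                    | some hx =>
                      exfalso
                      have hok' := hkeys _ _ hgg
                      have hpref : (id0' ++ ['>']) <+: pvRepl ('<' :: '@' :: (km ++ ['>'])) (pvHtml name) u :=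
                        ⟨after', by simp [hu']⟩
                      obtain ⟨rest', hrest'⟩ := pvRepl_prefix_reflect hmhead u id0' hok' hpref
                      have heq0 : id0 = id0' ∧ after = rest' :=
                        pvGtFree_unique hid0 (fun c hc => (hok' c hc).2)
                          (by rw [← hu, ← hrest']; simp)
                      have hg2 : repl.get? id0' = none := by rw [← heq0.1]; exact hrg
                      have h5 := hrepl id0'
                      rw [hg2, hgg] at h5
                      by_cases hxk : id0' = km
                      · rw [if_pos hxk] at h5; simp at h5
                      · rw [if_neg hxk] at h5; simp at h5
                  rw [pvScan_miss repl' hsp' hg'', hihAt]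
          · rw [pvRepl_cons_of_not_prefix _ htag]
            have hc' : ¬ (c = '<' ∧ (pvRepl ('<' :: '@' :: (km ++ ['>'])) (pvHtml name) t).head? = some '@') := by
              rintro ⟨rfl, hhx⟩
              exact hc ⟨rfl, pvRepl_head_amp rfl hmhead t hhx⟩
            rw [pvScan_cons_not repl' hc', pvScan_cons_not repl hc]
            rw [ih t (by simp at hlen; omega)]
  exact fun s => key s.length s le_rfl

-- ofList facts
theorem pvMem_items_update {κ ν : Type} [BEq κ] [LawfulBEq κ] :
    ∀ (l : List (κ × ν)) (d : PySem.Dict κ ν) (p : κ × ν),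
    p ∈ (d.update l).items → p ∈ d.items ∨ p ∈ l := by
  intro l
  induction l with
  | nil => intro d p h; exact Or.inl h
  | cons kv l' ih =>
    intro d p h
    rcases ih (d.insert kv.1 kv.2) p h with h1 | h1
    · rcases (PySem.Dict.mem_items_insert d kv.1 kv.2 p).mp h1 with h2 | ⟨h2, -⟩
      · right; simp [h2]
      · exact Or.inl h2
    · right; simp [h1]

theorem pvMem_items_ofList {κ ν : Type} [BEq κ] [LawfulBEq κ] :
    ∀ (l : List (κ × ν)) (p : κ × ν), p ∈ (PySem.Dict.ofList l).items → p ∈ l := by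
  intro l p h
  rcases pvMem_items_update l PySem.Dict.empty p h with h1 | h1
  · exact absurd h1 (by simp [PySem.Dict.empty])
  · exact h1

theorem pvKeys_insert_nodup {κ ν : Type} [BEq κ] [LawfulBEq κ] (d : PySem.Dict κ ν) (k : κ) (v : ν)
    (h : d.keys.Nodup) : (d.insert k v).keys.Nodup := by
  by_cases hc : d.contains k = true
  · have : (d.insert k v).keys = d.keys := by
      simp only [PySem.Dict.keys, PySem.Dict.items_insert, hc, if_pos]
      rw [List.map_map]
      apply List.map_congr_left
      intro p _
      by_cases hp : p.1 == k
      · simp [hp]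
        exact (LawfulBEq.eq_of_beq hp).symm
      · simp [hp]
    rw [this]; exact h
  · have : (d.insert k v).keys = d.keys ++ [k] := by
      simp [PySem.Dict.keys, PySem.Dict.items_insert, hc]
    rw [this]
    refine List.Nodup.append h (by simp) ?_
    intro a ha hb
    simp at hb
    subst hb
    exact hc ((PySem.Dict.contains_iff_mem_keys d a).mpr ha)

theorem pvNodup_keys_update {κ ν : Type} [BEq κ] [LawfulBEq κ] :
    ∀ (l : List (κ × ν)) (d : PySem.Dict κ ν), d.keys.Nodup → (d.update l).keys.Nodup := by
  intro l
  induction l with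
  | nil => intro d h; exact h
  | cons kv l' ih => intro d h; exact ih _ (pvKeys_insert_nodup d kv.1 kv.2 h)

theorem pvNodup_keys_ofList {κ ν : Type} [BEq κ] [LawfulBEq κ] (l : List (κ × ν)) :
    (PySem.Dict.ofList l).keys.Nodup := by
  apply pvNodup_keys_update
  simp [PySem.Dict.keys, PySem.Dict.empty]

-- the fold over members = the scan
theorem pvAfold : ∀ (ms : List (String × Option (List (String × String)))),
    (∀ kv ∈ ms, pvKeyOk kv.1.toList ∧ (∀ c ∈ (pvGetName kv.2).toList, c ≠ '<')) →
    (ms.map (fun kv => kv.1.toList)).Nodup →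
    ∀ s, ms.foldl (fun c kv => pvRepl (pvTag kv.1) (pvHtml (pvGetName kv.2)) c) s
      = pvScan (pvRepls ms) s := by
  intro ms
  induction ms with
  | nil => intro _ _ s; exact (pvScan_empty s).symm
  | cons m ms ih =>
    intro hok hnd s
    have hok' : ∀ kv ∈ ms, pvKeyOk kv.1.toList ∧ (∀ c ∈ (pvGetName kv.2).toList, c ≠ '<') :=
      fun kv h => hok kv (by simp [h])
    simp only [List.map_cons, List.nodup_cons] at hnd
    have hmem : ∀ kv ∈ ms, kv.1.toList ≠ m.1.toList := by
      intro kv hkv heq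
      exact hnd.1 (heq ▸ List.mem_map_of_mem hkv)
    have hmiss : (pvRepls ms).get? m.1.toList = none := by
      rw [pvRepls, pvGet_foldl_insert_not_mem _ _ ms PySem.Dict.empty _ hmem]
      exact PySem.Dict.get?_empty _
    have hkeys : ∀ x h, (pvRepls ms).get? x = some h → pvKeyOk x := by
      intro x h hx
      rw [pvRepls] at hx
      refine pvGet_foldl_insert_prop (fun kv => kv.1.toList) (fun kv => pvHtml (pvGetName kv.2))
        pvKeyOk ms PySem.Dict.empty (fun kv hkv => (hok' kv hkv).1) ?_ x h hx
      intro y hy hgy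
      rw [PySem.Dict.get?_empty] at hgy
      simp at hgy
    have hrepl : ∀ x, (pvRepls (m :: ms)).get? x =
        if x = m.1.toList then some (pvHtml (pvGetName m.2)) else (pvRepls ms).get? x := by
      intro x
      by_cases hx : x = m.1.toList
      · subst hx
        rw [if_pos rfl, pvRepls, List.foldl_cons,
            pvGet_foldl_insert_not_mem _ _ ms _ _ hmem, PySem.Dict.get?_insert_self]
      · rw [if_neg hx, pvRepls, pvRepls, List.foldl_cons]
        exact pvGet_foldl_insert_congr _ _ ms _ _ x (PySem.Dict.get?_insert_of_ne _ _ hx)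
    rw [List.foldl_cons, ih hok' hnd.2 _]
    exact pvKey m.1.toList (pvHtml (pvGetName m.2)) (pvGetName m.2) (pvRepls ms)
      (pvRepls (m :: ms)) (hok m (by simp)).1 rfl (hok m (by simp)).2 hmiss hkeys hrepl s

theorem pvNoTagStart_repl {x new : List Char} : ∀ {u : List Char}, ¬ ['<', '@'] <:+: u →
    pvRepl ('<' :: '@' :: x) new u = u := by
  intro u
  induction u with
  | nil => intro _; exact pvRepl_nil _ _
  | cons c t ih =>
    intro h
    have hnp : ¬ ('<' :: '@' :: x) <+: (c :: t) := by
      intro hp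
      rcases hp with ⟨w, hw⟩
      exact h (List.IsPrefix.isInfix ⟨x ++ w, by simp [← hw]⟩)
    rw [pvRepl_cons_of_not_prefix _ hnp, ih (fun hi => h (List.infix_cons hi))]

theorem pvScan_no_tagstart (r : PySem.Dict (List Char) (List Char)) :
    ∀ (u : List Char), ¬ ['<', '@'] <:+: u → pvScan r u = u := by
  intro u
  induction u with
  | nil => intro _; exact pvScan_nil _
  | cons c t ih =>
    intro h
    have hc : ¬ (c = '<' ∧ t.head? = some '@') := by
      rintro ⟨rfl, hh⟩
      obtain ⟨u', rfl⟩ : ∃ u', t = '@' :: u' := by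
        cases t with
        | nil => simp at hh
        | cons a b =>
          have : a = '@' := by simpa using hh
          exact ⟨b, by rw [this]⟩
      exact h (List.IsPrefix.isInfix ⟨u', rfl⟩)
    rw [pvScan_cons_not r hc, ih (fun hi => h (List.infix_cons hi))]

theorem pvFold_no_tagstart : ∀ (l : List (String × Option (List (String × String)))) (u : List Char),
    ¬ ['<', '@'] <:+: u →
    l.foldl (fun c kv => pvRepl (pvTag kv.1) (pvHtml (pvGetName kv.2)) c) u = u := by
  intro l
  induction l with
  | nil => intro u _; rfl
  | cons kv l ih =>
    intro u h
    rw [List.foldl_cons, show pvTag kv.1 = '<' :: '@' :: (kv.1.toList ++ ['>']) from rfl,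
        pvNoTagStart_repl h, ih u h]

theorem pvFoldl_bridge : ∀ (l : List (String × Option (List (String × String)))) (s : List Char),
    l.foldl (fun c kv => PySem.Chars.replace c (pvTag kv.1) (pvHtml (pvGetName kv.2))) s
    = l.foldl (fun c kv => pvRepl (pvTag kv.1) (pvHtml (pvGetName kv.2)) c) s := by
  intro l
  induction l with
  | nil => intro s; rfl
  | cons kv l ih =>
    intro s
    rw [List.foldl_cons, List.foldl_cons, pvReplace_eq_pvRepl _ _ (by simp [pvTag]), ih]

-- ===== VERDICT (by name: the statement is the Claim_ definition above) =====
theorem content_replacement_spec : Claim_equal_content_replacement := by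
  intro content members _ hpre
  unfold Spec_content_replacement content_replacement content_replacement_alt
  have hX : (PySem.Dict.ofList members).items.foldl
      (fun c kv => PySem.Chars.replace c (pvTag kv.1) (pvHtml (pvGetName kv.2))) content.toList
      = pvScan (pvRepls (PySem.Dict.ofList members).items) content.toList := by
    rw [pvFoldl_bridge]
    rcases hpre with hno | hpre
    · have hinf : ¬ (['<', '@'] <:+: content.toList) := by
        intro hi
        have : PySem.Str.isIn "<@" content = true := (PySem.Str.isIn_iff_infix "<@" content).mpr hi
        rw [hno] at this
        exact Bool.false_ne_true this
      rw [pvFold_no_tagstart _ _ hinf, pvScan_no_tagstart _ _ hinf]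
    apply pvAfold
    · intro kv hkv
      obtain ⟨h1, h2⟩ := hpre kv (pvMem_items_ofList members kv hkv)
      constructor
      · intro c hc
        have := List.all_eq_true.mp h1 c hc
        simp at this
        exact this
      · intro c hc
        have := List.all_eq_true.mp h2 c hc
        simpa using this
    · have h0 := pvNodup_keys_ofList (ν := Option (List (String × String))) members
      have he : ((PySem.Dict.ofList members).items.map (fun kv => kv.1.toList))
          = ((PySem.Dict.ofList members).keys.map String.toList) := by
        simp [PySem.Dict.keys, List.map_map]
      rw [he]
      exact h0.map (fun a b h => String.toList_injective h)
  rw [hX]
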